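-- pv_equiv track=rewrite | github.com/mmuramatsu/coding-challenges | LeetCode/Easy/2099-Find_Subsequence_Of_Length_K_With_The_Largest_Sum/2099-FindSubsequenceOfLengthKWithTheLargestSum.py | maxSubsequence1
-- ===== SOURCE A (Python) =====
-- def maxSubsequence1(nums: list[int], k: int) -> list[int]:
--     aux = nums.copy()
--     aux.sort(reverse=True)
--     aux = aux[:k]
--
--     n = len(nums)
--
--     picked = [False] * n
--
--     ans = []
--
--     for _ in range(k):
--         i = 0
--         while i < n:
--             if nums[i] in aux and not picked[i]:
--                 break
--             i += 1
--
--         aux.remove(nums[i])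
--         picked[i] = True
--         ans.append(nums[i])
--
--     return ans
-- ===== SOURCE B (Python) =====
-- def maxSubsequence1(nums: list[int], k: int) -> list[int]:
--     if k <= 0:
--         return []
--     t = sorted(nums, reverse=True)[k - 1]
--     quota = k - sum(1 for x in nums if x > t)
--     ans = []
--     for x in nums:
--         if x > t:
--             ans.append(x)
--         elif x == t and quota > 0:
--             ans.append(x)
--             quota -= 1
--     return ans
-- ===== Notes on version B (the rewrite author's own statement) =====
-- stated objective: faster
-- what changed: Instead of k rounds of scan-for-leftmost-remaining-top-k-element (with list membership and removal inside), B sorts once to find the k-th largest threshold, then selects in one pass every element strictly above it plus the leftmost occurrences of the threshold up to the remaining quota.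
import Mathlib
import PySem

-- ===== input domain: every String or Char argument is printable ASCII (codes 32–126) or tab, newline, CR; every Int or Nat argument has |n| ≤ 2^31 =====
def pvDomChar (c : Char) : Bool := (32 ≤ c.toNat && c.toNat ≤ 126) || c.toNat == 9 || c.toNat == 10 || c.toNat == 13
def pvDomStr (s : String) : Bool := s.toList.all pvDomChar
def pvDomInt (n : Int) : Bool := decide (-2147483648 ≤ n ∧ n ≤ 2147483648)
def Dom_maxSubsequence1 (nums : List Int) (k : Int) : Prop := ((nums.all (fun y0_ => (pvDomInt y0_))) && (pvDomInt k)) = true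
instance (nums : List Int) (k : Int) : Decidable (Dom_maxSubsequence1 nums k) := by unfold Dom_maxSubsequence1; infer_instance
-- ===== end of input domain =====

-- B replaces A's k rounds of scan-for-the-leftmost-remaining-top-k-element by a single
-- threshold (k-th largest) pass; the equivalence below is about the return value (A mutates
-- only its local copies, never its arguments).

-- ===== PORT A =====
-- the 'while i < n' inner loop of A; fuel = nums.length - i makes the 'i < n' check structural
def findIdxF (nums aux : List Int) (picked : List Bool) : Nat → Nat → Option Nat
  | 0, _ => none
  | fuel+1, i =>
    if nums.getD i 0 ∈ aux ∧ picked.getD i true = false then some i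
    else findIdxF nums aux picked fuel (i+1)

def findIdx (nums aux : List Int) (picked : List Bool) (i : Nat) : Option Nat :=
  findIdxF nums aux picked (nums.length - i) i

-- A's 'for _ in range(k)' loop over the state (aux, picked, ans)
def rounds (nums : List Int) : Nat → List Int → List Bool → List Int → List Int
  | 0, _, _, ans => ans
  | r+1, aux, picked, ans =>
    match findIdx nums aux picked 0 with
    | none => ans   -- Python: i = n here and nums[n] raises IndexError; excluded by Pre_
    | some i =>
      let x := nums.getD i 0
      rounds nums r ((PySem.List.remove? aux x).getD aux) (picked.set i true) (ans ++ [x])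

def maxSubsequence1 (nums : List Int) (k : Int) : List Int :=
  let aux := PySem.List.slice (PySem.List.sorted nums (fun x => x) true) none (some k)
  rounds nums k.toNat aux (List.replicate nums.length false) []

-- ===== PORT B =====
def maxSubsequence1_alt (nums : List Int) (k : Int) : List Int :=
  if k ≤ 0 then []
  else
    let t := (PySem.List.pyGet? (PySem.List.sorted nums (fun x => x) true) (k - 1)).getD 0
    let quota := k - nums.foldl (fun acc x => if t < x then acc + 1 else acc) 0
    (nums.foldl (fun (st : Int × List Int) x =>
        if t < x then (st.1, st.2 ++ [x])
        else if x = t ∧ 0 < st.1 then (st.1 - 1, st.2 ++ [x])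
        else st) (quota, [])).2

-- ===== PRECONDITION & SPEC =====
-- Pre_ excludes exactly k > len(nums), where A's final round finds no pickable index and
-- nums[n] raises IndexError (B's sorted(nums)[k-1] raises there too)
def Pre_maxSubsequence1 (nums : List Int) (k : Int) : Prop := k ≤ (nums.length : Int)
instance (nums : List Int) (k : Int) : Decidable (Pre_maxSubsequence1 nums k) := by unfold Pre_maxSubsequence1; infer_instance
def pvWitness_maxSubsequence1 : List Int × Int := ([3, 1, 2], 2)

def Spec_maxSubsequence1 (nums : List Int) (k : Int) (out : List Int) : Prop := out = maxSubsequence1_alt nums k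
instance (nums : List Int) (k : Int) (out : List Int) : Decidable (Spec_maxSubsequence1 nums k out) := by unfold Spec_maxSubsequence1; infer_instance

-- ===== CLAIM (what is proved, stated in full; the proofs are below) =====
def Claim_equal_maxSubsequence1 : Prop := ∀ (nums : List Int) (k : Int), Dom_maxSubsequence1 nums k → Pre_maxSubsequence1 nums k → Spec_maxSubsequence1 nums k (maxSubsequence1 nums k)

-- ===== LEMMAS AND PROOFS =====

-- common reference point of both proofs: walk the list left to right, picking every element
-- still present in the multiset aux and removing it as it is picked
def pickGo : List Int → List Int → List Int
  | [], _ => []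
  | x :: xs, aux => if x ∈ aux then x :: pickGo xs (aux.erase x) else pickGo xs aux

lemma findIdxF_eval (nums aux : List Int) (picked : List Bool) :
    ∀ fuel i m, fuel = nums.length - i → i ≤ m → m < nums.length →
    (∀ j, i ≤ j → j < m → ¬(nums.getD j 0 ∈ aux ∧ picked.getD j true = false)) →
    (nums.getD m 0 ∈ aux ∧ picked.getD m true = false) →
    findIdxF nums aux picked fuel i = some m := by
  intro fuel
  induction fuel with
  | zero => intro i m hf him hm _ _; omega
  | succ f ih =>
    intro i m hf him hm hskip hhit
    by_cases hi : i = m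
    · subst hi; simp only [findIdxF, if_pos hhit]
    · have h1 : ¬(nums.getD i 0 ∈ aux ∧ picked.getD i true = false) :=
        hskip i (le_refl _) (by omega)
      simp only [findIdxF, if_neg h1]
      exact ih (i+1) m (by omega) (by omega) hm (fun j hj hj' => hskip j (by omega) hj') hhit

lemma findIdx_hit (P : List Int) (x : Int) (S : List Int) (pb rest : List Bool) (aux : List Int)
    (hpb : pb.length = P.length)
    (hskip : ∀ j, j < P.length → pb.getD j true = false → P.getD j 0 ∉ aux)
    (hx : x ∈ aux) :
    findIdx (P ++ x :: S) aux (pb ++ false :: rest) 0 = some P.length := by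
  unfold findIdx
  apply findIdxF_eval
  · omega
  · omega
  · simp
  · intro j h0 hj hc
    have hgn : (P ++ x :: S).getD j 0 = P.getD j 0 := by
      simp [List.getD, List.getElem?_append_left hj]
    have hgp : (pb ++ false :: rest).getD j true = pb.getD j true := by
      simp [List.getD, List.getElem?_append_left (by omega : j < pb.length)]
    rw [hgn, hgp] at hc
    exact hskip j hj hc.2 hc.1
  · constructor
    · have : (P ++ x :: S).getD P.length 0 = x := by
        rw [List.getD_eq_getElem?_getD, List.getElem?_append_right (le_refl _)]; simp
      rw [this]; exact hx
    · have : (pb ++ false :: rest).getD P.length true = false := by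
        rw [← hpb, List.getD_eq_getElem?_getD, List.getElem?_append_right (le_refl _)]; simp
      rw [this]

lemma rounds_eq : ∀ (S P : List Int) (pb : List Bool) (aux ans : List Int),
    pb.length = P.length →
    (∀ j, j < P.length → pb.getD j true = false → P.getD j 0 ∉ aux) →
    List.Subperm aux S →
    rounds (P ++ S) aux.length aux (pb ++ List.replicate S.length false) ans
      = ans ++ pickGo S aux := by
  intro S
  induction S with
  | nil =>
    intro P pb aux ans _ _ hsub
    have : aux = [] := List.subperm_nil.mp hsub
    subst this
    simp [rounds, pickGo]
  | cons x S' ih =>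
    intro P pb aux ans hpb hskip hsub
    by_cases hx : x ∈ aux
    · -- hit case
      have hlen : aux.length = (aux.erase x).length + 1 := (List.length_erase_add_one hx).symm
      rw [hlen]
      have hrepl : List.replicate (x :: S').length false = false :: List.replicate S'.length false := by
        simp [List.replicate]
      rw [hrepl]
      simp only [rounds]
      rw [findIdx_hit P x S' pb (List.replicate S'.length false) aux hpb hskip hx]
      have hgx : (P ++ x :: S').getD P.length 0 = x := by
        rw [List.getD_eq_getElem?_getD, List.getElem?_append_right (le_refl _)]; simp
      have hrm : (PySem.List.remove? aux x).getD aux = aux.erase x := by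
        rw [PySem.List.remove?_eq_some_erase aux x hx]; rfl
      have hset : (pb ++ false :: List.replicate S'.length false).set P.length true
          = (pb ++ [true]) ++ List.replicate S'.length false := by
        rw [← hpb, List.set_append_right _ _ (le_refl _)]
        simp
      simp only [hgx, hrm, hset]
      have hP : P ++ x :: S' = (P ++ [x]) ++ S' := by simp
      rw [hP]
      rw [ih (P ++ [x]) (pb ++ [true]) (aux.erase x) (ans ++ [x])
        (by simp [hpb])
        (by
          intro j hj hgd
          simp at hj
          rcases Nat.lt_or_ge j P.length with hj' | hj'
          · have h1 : (pb ++ [true]).getD j true = pb.getD j true := by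
              simp [List.getD, List.getElem?_append_left (by omega : j < pb.length)]
            have h2 : (P ++ [x]).getD j 0 = P.getD j 0 := by
              simp [List.getD, List.getElem?_append_left hj']
            rw [h1] at hgd; rw [h2]
            intro hmem
            exact hskip j hj' hgd (List.mem_of_mem_erase hmem)
          · have hj'' : j = P.length := by omega
            subst hj''
            rw [← hpb] at hgd
            have : (pb ++ [true]).getD pb.length true = true := by
              rw [List.getD_eq_getElem?_getD, List.getElem?_append_right (le_refl _)]; simp
            rw [this] at hgd; exact absurd hgd (by simp)
        )
        (by
          rw [List.subperm_ext_iff]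
          intro v hv
          have hv' : v ∈ aux := List.mem_of_mem_erase hv
          have := (List.subperm_ext_iff.mp hsub) v hv'
          by_cases hvx : v = x
          · subst hvx
            rw [List.count_erase_self]
            simp at this ⊢
            omega
          · rw [List.count_erase_of_ne hvx]
            rw [List.count_cons_of_ne (Ne.symm hvx)] at this
            exact this
        )]
      have : pickGo (x :: S') aux = x :: pickGo S' (aux.erase x) := by
        simp [pickGo, hx]
      rw [this]
      simp
    · -- skip case
      have hrw1 : P ++ x :: S' = (P ++ [x]) ++ S' := by simp
      have hrw2 : pb ++ List.replicate (x :: S').length false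
          = (pb ++ [false]) ++ List.replicate S'.length false := by
        simp [List.replicate]
      rw [hrw1, hrw2]
      rw [ih (P ++ [x]) (pb ++ [false]) aux ans
        (by simp [hpb])
        (by
          intro j hj hgd
          simp at hj
          rcases Nat.lt_or_ge j P.length with hj' | hj'
          · have h1 : (pb ++ [false]).getD j true = pb.getD j true := by
              simp [List.getD, List.getElem?_append_left (by omega : j < pb.length)]
            have h2 : (P ++ [x]).getD j 0 = P.getD j 0 := by
              simp [List.getD, List.getElem?_append_left hj']
            rw [h1] at hgd; rw [h2]
            exact hskip j hj' hgd
          · have hj'' : j = P.length := by omega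
            subst hj''
            have h2 : (P ++ [x]).getD P.length 0 = x := by
              rw [List.getD_eq_getElem?_getD, List.getElem?_append_right (le_refl _)]; simp
            rw [h2]; exact hx
        )
        (by
          rw [List.subperm_ext_iff]
          intro v hv
          have := (List.subperm_ext_iff.mp hsub) v hv
          have hvx : v ≠ x := fun h => hx (h ▸ hv)
          rw [List.count_cons_of_ne (Ne.symm hvx)] at this
          exact this
        )]
      have : pickGo (x :: S') aux = pickGo S' aux := by simp [pickGo, hx]
      rw [this]

lemma bfold_eq (t : Int) : ∀ (rest aux : List Int) (q : Int) (ans : List Int),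
    (∀ v, t < v → rest.count v ≤ aux.count v) →
    ((aux.count t : Int) = q) →
    (∀ v, v < t → aux.count v = 0) →
    (rest.foldl (fun (st : Int × List Int) x =>
        if t < x then (st.1, st.2 ++ [x])
        else if x = t ∧ 0 < st.1 then (st.1 - 1, st.2 ++ [x])
        else st) (q, ans)).2 = ans ++ pickGo rest aux := by
  intro rest
  induction rest with
  | nil => intro aux q ans _ _ _; simp [pickGo]
  | cons x xs ih =>
    intro aux q ans ha hb hc
    by_cases h1 : t < x
    · have hxa : x ∈ aux := by
        have := ha x h1
        have hcx : 0 < List.count x (x :: xs) := by simp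
        exact List.count_pos_iff.mp (by omega)
      simp only [List.foldl_cons, if_pos h1]
      rw [ih (aux.erase x) q (ans ++ [x])
        (by
          intro v hv
          by_cases hvx : v = x
          · subst hvx
            rw [List.count_erase_self]
            have := ha v hv
            simp at this ⊢
            omega
          · rw [List.count_erase_of_ne hvx]
            have := ha v hv
            rw [List.count_cons_of_ne (Ne.symm hvx)] at this
            exact this)
        (by
          rw [List.count_erase_of_ne (by omega : t ≠ x)]
          exact hb)
        (by
          intro v hv
          by_cases hvx : v = x
          · omega
          · rw [List.count_erase_of_ne hvx]; exact hc v hv)]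
      have : pickGo (x :: xs) aux = x :: pickGo xs (aux.erase x) := by simp [pickGo, hxa]
      rw [this]; simp
    · by_cases h2 : x = t ∧ 0 < q
      · obtain ⟨hxt, hq⟩ := h2
        subst hxt
        have hxa : x ∈ aux := List.count_pos_iff.mp (by omega)
        simp only [List.foldl_cons, if_neg h1]
        rw [if_pos (show (True ∧ 0 < q) from ⟨trivial, hq⟩)]
        rw [ih (aux.erase x) (q - 1) (ans ++ [x])
          (by
            intro v hv
            rw [List.count_erase_of_ne (by omega : v ≠ x)]
            have := ha v hv
            rw [List.count_cons_of_ne (by omega : x ≠ v)] at this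
            exact this)
          (by rw [List.count_erase_self]; omega)
          (by
            intro v hv
            rw [List.count_erase_of_ne (by omega : v ≠ x)]
            exact hc v hv)]
        have : pickGo (x :: xs) aux = x :: pickGo xs (aux.erase x) := by simp [pickGo, hxa]
        rw [this]; simp
      · have hxa : x ∉ aux := by
          intro hmem
          have hpos : 0 < aux.count x := List.count_pos_iff.mpr hmem
          rcases lt_trichotomy x t with h | h | h
          · have := hc x h; omega
          · refine h2 ⟨h, ?_⟩
            rw [h] at hpos
            omega
          · exact h1 h
        simp only [List.foldl_cons, if_neg h1, if_neg h2]
        rw [ih aux q ans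
          (by
            intro v hv
            have h4 := ha v hv
            have h3 : List.count v xs ≤ List.count v (x :: xs) := by
              simp [List.count_cons]
            omega)
          hb hc]
        have : pickGo (x :: xs) aux = pickGo xs aux := by simp [pickGo, hxa]
        rw [this]

-- ===== VERDICT (by name: the statement is the Claim_ definition above) =====
theorem maxSubsequence1_spec : Claim_equal_maxSubsequence1 := by
  intro nums k _ hpre
  unfold Pre_maxSubsequence1 at hpre
  unfold Spec_maxSubsequence1
  by_cases hk : k ≤ 0
  · have h0 : k.toNat = 0 := by omega
    simp [maxSubsequence1, maxSubsequence1_alt, h0, hk, rounds]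
  · -- main case 1 ≤ k ≤ n
    set l := PySem.List.sorted nums (fun x : Int => x) true with hl
    have hlen : l.length = nums.length := PySem.List.length_sorted nums _ true
    have hperm : l.Perm nums := PySem.List.sorted_perm nums _ true
    have hpair : List.Pairwise (fun a b : Int => b ≤ a) l :=
      PySem.List.sorted_pairwise_rev nums (fun x : Int => x)
    have hpw := List.pairwise_iff_getElem.mp hpair
    set K := k.toNat with hKdef
    have hK1 : 1 ≤ K := by omega
    have hKn : K ≤ l.length := by omega
    have hKl : K - 1 < l.length := by omega
    set t : Int := l[K-1]'hKl with ht
    -- the two sides' shared data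
    have hslice : PySem.List.slice l none (some k) = l.take K :=
      PySem.List.slice_to l (by omega)
    have htl : (l.take K).length = K := by simp [List.length_take]; omega
    -- F1 / F2
    have F1 : ∀ x ∈ l.take K, t ≤ x := by
      intro x hx
      rw [List.mem_take_iff_getElem] at hx
      obtain ⟨i, hi, rfl⟩ := hx
      rcases Nat.lt_or_ge i (K-1) with h | h
      · exact hpw i (K-1) (by omega) hKl h
      · have : i = K - 1 := by omega
        subst this; exact le_refl _
    have F2 : ∀ x ∈ l.drop K, x ≤ t := by
      intro x hx
      rw [List.mem_iff_getElem] at hx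
      obtain ⟨i, hi, rfl⟩ := hx
      rw [List.getElem_drop]
      exact hpw (K-1) (K+i) hKl (by simp at hi; omega) (by omega)
    -- count bridges
    have hsplit : ∀ v : Int, nums.count v = (l.take K).count v + (l.drop K).count v := by
      intro v
      rw [← hperm.count_eq, ← List.count_append, List.take_append_drop]
    have hsplitP : ∀ p : Int → Bool, nums.countP p = (l.take K).countP p + (l.drop K).countP p := by
      intro p
      rw [← (List.Perm.countP_eq p hperm), ← List.countP_append, List.take_append_drop]
    have ha : ∀ v, t < v → nums.count v ≤ (l.take K).count v := by
      intro v hv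
      rw [hsplit v]
      have : (l.drop K).count v = 0 :=
        List.count_eq_zero.mpr (fun hmem => absurd (F2 v hmem) (by omega))
      omega
    have hc : ∀ v, v < t → (l.take K).count v = 0 := by
      intro v hv
      exact List.count_eq_zero.mpr (fun hmem => absurd (F1 v hmem) (by omega))
    have hb : ((l.take K).count t : Int)
        = k - (nums.countP (fun x => decide (t < x)) : Int) := by
      have hdrop0 : (l.drop K).countP (fun x => decide (t < x)) = 0 :=
        List.countP_eq_zero.mpr (fun x hmem => by simpa using not_lt.mpr (F2 x hmem))
      have hnl : nums.countP (fun x => decide (t < x)) = (l.take K).countP (fun x => decide (t < x)) := by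
        rw [hsplitP]; omega
      have hKsplit : K = (l.take K).countP (fun x => decide (t < x)) + (l.take K).count t := by
        have := List.length_eq_countP_add_countP (fun x : Int => decide (t < x)) (l := l.take K)
        rw [htl] at this
        have hcc : (l.take K).count t = List.countP (fun a => decide (¬ decide (t < a) = true)) (l.take K) := by
          rw [List.count_eq_countP]
          apply List.countP_congr
          intro x hx
          have hxt := F1 x hx
          by_cases hxe : x = t
          · simp [hxe]
          · simp [hxe]; omega
        omega
      have hkK : (K : Int) = k := by omega
      rw [hnl]
      omega
    -- A side
    have hA : maxSubsequence1 nums k = pickGo nums (l.take K) := by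
      unfold maxSubsequence1
      rw [← hl, hslice]
      have := rounds_eq nums [] [] (l.take K) [] rfl (by intro j hj; simp at hj)
        (List.Subperm.trans (List.Sublist.subperm (List.take_sublist K l)) hperm.subperm)
      simpa [htl] using this
    -- B side
    have hget : (PySem.List.pyGet? l (k-1)).getD 0 = t := by
      rw [PySem.List.pyGet?_of_nonneg l (by omega)]
      have h1 : (k-1).toNat = K - 1 := by omega
      rw [h1, List.getElem?_eq_getElem hKl]
      rfl
    have hB : maxSubsequence1_alt nums k = pickGo nums (l.take K) := by
      simp only [maxSubsequence1_alt, if_neg hk, ← hl, hget]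
      rw [PySem.List.foldl_ite_add_one (fun x => t < x) nums 0]
      have := bfold_eq t nums (l.take K) (k - (0 + (nums.countP (fun x => decide (t < x)) : Int))) []
        (by intro v hv; exact ha v hv)
        (by rw [hb]; ring)
        hc
      simpa using this
    rw [hA, hB]
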